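-- pv_equiv track=rewrite | github.com/andrewcho-dev/opsconductor-ng | discovery-service/utils/utility_network_scanner.py | select_preferred_service
-- ===== SOURCE A (Python) =====
-- from typing import List, Dict, Optional, Tuple
--
-- def select_preferred_service(services: List[Dict]) -> Optional[Dict]:
--     """Select preferred service based on security and availability"""
--     if not services:
--         return None
--
--     # Priority order: SSH (22), WinRM HTTPS (5986), WinRM HTTP (5985), RDP (3389)
--     priority_ports = [22, 5986, 5985, 3389]
--
--     for priority_port in priority_ports:
--         for service in services:
--             if service['port'] == priority_port:
--                 return service
--
--     # If no priority service found, return first available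
--     return services[0]
-- ===== SOURCE B (Python) =====
-- def select_preferred_service(services):
--     """Select preferred service based on security and availability"""
--     if not services:
--         return None
--
--     # rank by priority: SSH (22) best, then WinRM HTTPS/HTTP, then RDP
--     rank = {22: 0, 5986: 1, 5985: 2, 3389: 3}
--
--     best = None
--     best_rank = 4
--     for service in services:
--         r = rank.get(service['port'], 4)
--         if r == 0:
--             return service  # top priority, nothing can beat it
--         if r < best_rank:
--             best = service
--             best_rank = r
--
--     return best if best is not None else services[0]
-- ===== Notes on version B (the rewrite author's own statement) =====
-- stated objective: faster
-- what changed: Replaced A's four sequential full scans (one per priority port) with a single pass that tracks the best-ranked service via a rank dict, returning immediately on port 22.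
import Mathlib
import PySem

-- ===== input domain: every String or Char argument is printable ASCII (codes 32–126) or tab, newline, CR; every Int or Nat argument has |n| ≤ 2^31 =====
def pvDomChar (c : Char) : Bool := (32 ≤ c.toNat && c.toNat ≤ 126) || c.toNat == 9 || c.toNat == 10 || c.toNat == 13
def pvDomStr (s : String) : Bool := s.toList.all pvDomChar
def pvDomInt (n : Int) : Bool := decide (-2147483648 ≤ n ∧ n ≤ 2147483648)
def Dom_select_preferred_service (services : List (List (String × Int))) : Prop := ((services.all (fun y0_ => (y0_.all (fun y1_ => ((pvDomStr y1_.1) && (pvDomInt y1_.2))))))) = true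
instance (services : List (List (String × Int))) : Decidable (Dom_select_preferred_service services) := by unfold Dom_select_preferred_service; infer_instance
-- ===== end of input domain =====

-- B replaces A's four sequential scans over the service list (one per priority
-- port) with a single pass that tracks the best-ranked service via a rank dict.

-- service['port'] : first match in the association list (Python dict lookup)
def pvGetPort? (s : List (String × Int)) : Option Int :=
  (s.find? (fun kv => kv.1 == "port")).map (·.2)

-- ===== PORT A =====
-- inner loop: 'for service in services: if service['port'] == priority_port: return service'
def pvScanA (services : List (List (String × Int))) (p : Int) : Option (List (String × Int)) :=
  match services with
  | [] => none
  | s :: rest => if pvGetPort? s = some p then some s else pvScanA rest p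

-- outer loop over priority_ports; base case is the final 'return services[0]'
def pvOuterA (ports : List Int) (services : List (List (String × Int))) : Option (List (String × Int)) :=
  match ports with
  | [] => services.head?
  | p :: ps =>
    match pvScanA services p with
    | some s => some s
    | none => pvOuterA ps services

def select_preferred_service (services : List (List (String × Int))) : Option (List (String × Int)) :=
  if services = [] then none
  else pvOuterA [22, 5986, 5985, 3389] services

-- ===== PORT B =====
-- r = rank.get(service['port'], 4)  (missing 'port' key is outside Pre_; 0 is not a priority port)
def pvRankB (s : List (String × Int)) : Int :=
  PySem.Dict.getD (PySem.Dict.ofList [(22, (0:Int)), (5986, 1), (5985, 2), (3389, 3)])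
    ((pvGetPort? s).getD 0) 4

-- single pass tracking (best, best_rank); early return on rank 0
def pvLoopB (services : List (List (String × Int))) (best : Option (List (String × Int)))
    (bestRank : Int) : Option (List (String × Int)) :=
  match services with
  | [] => best
  | s :: rest =>
    let r := pvRankB s
    if r = 0 then some s
    else if r < bestRank then pvLoopB rest (some s) r
    else pvLoopB rest best bestRank

def select_preferred_service_alt (services : List (List (String × Int))) : Option (List (String × Int)) :=
  if services = [] then none
  else
    match pvLoopB services none 4 with
    | some s => some s
    | none => services.head?

-- ===== PRECONDITION & SPEC =====
-- Pre_ excludes exactly the inputs on which Python A raises KeyError: a service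
-- without a 'port' key is reached in the first scan, i.e. occurs before any
-- port-22 service (B raises the same KeyError there).
def Pre_select_preferred_service (services : List (List (String × Int))) : Prop :=
  ∀ i : Fin services.length, pvGetPort? services[i] = none →
    ∃ j : Fin services.length, (j : ℕ) < (i : ℕ) ∧ pvGetPort? services[j] = some 22
instance (services : List (List (String × Int))) : Decidable (Pre_select_preferred_service services) := by unfold Pre_select_preferred_service; infer_instance
def pvWitness_select_preferred_service : (List (List (String × Int))) := [[("port", 5985)], [("port", 22)]]

def Spec_select_preferred_service (services : List (List (String × Int))) (out : Option (List (String × Int))) : Prop := out = select_preferred_service_alt services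
instance (services : List (List (String × Int))) (out : Option (List (String × Int))) : Decidable (Spec_select_preferred_service services out) := by unfold Spec_select_preferred_service; infer_instance

-- ===== CLAIM (what is proved, stated in full; the proofs are below) =====
def Claim_equal_select_preferred_service : Prop := ∀ (services : List (List (String × Int))), Dom_select_preferred_service services → Pre_select_preferred_service services → Spec_select_preferred_service services (select_preferred_service services)

-- ===== LEMMAS AND PROOFS =====

-- the ports B has already examined (ranks < br), as a list
def pvPortsBelow (br : Int) : List Int :=
  if br = 1 then [22]
  else if br = 2 then [22, 5986]
  else if br = 3 then [22, 5986, 5985]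
  else [22, 5986, 5985, 3389]

-- A's outer loop without the fallback
def pvFindA (ports : List Int) (services : List (List (String × Int))) : Option (List (String × Int)) :=
  match ports with
  | [] => none
  | p :: ps =>
    match pvScanA services p with
    | some s => some s
    | none => pvFindA ps services

theorem pvFindA_nil (ports : List Int) : pvFindA ports [] = none := by
  induction ports with
  | nil => rfl
  | cons p ps ih => simp [pvFindA, pvScanA, ih]

theorem pvScanA_cons_eq (s : List (String × Int)) (rest : List (List (String × Int)))
    (q : Int) (h : pvGetPort? s = some q) : pvScanA (s :: rest) q = some s := by
  simp [pvScanA, h]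

theorem pvScanA_cons_ne (s : List (String × Int)) (rest : List (List (String × Int)))
    (q : Int) (h : pvGetPort? s ≠ some q) : pvScanA (s :: rest) q = pvScanA rest q := by
  simp [pvScanA, h]

theorem pvRank_cases (s : List (String × Int)) :
    (pvRankB s = 0 ∧ pvGetPort? s = some 22) ∨
    (pvRankB s = 1 ∧ pvGetPort? s = some 5986) ∨
    (pvRankB s = 2 ∧ pvGetPort? s = some 5985) ∨
    (pvRankB s = 3 ∧ pvGetPort? s = some 3389) ∨
    (pvRankB s = 4 ∧ ∀ q ∈ ([22, 5986, 5985, 3389] : List Int), pvGetPort? s ≠ some q) := by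
  unfold pvRankB
  rcases hx : pvGetPort? s with _ | v
  · right; right; right; right
    constructor
    · decide
    · simp
  · simp only [Option.getD_some]
    by_cases h22 : v = 22
    · subst h22; left; exact ⟨by decide, rfl⟩
    · by_cases h86 : v = 5986
      · subst h86; right; left; exact ⟨by decide, rfl⟩
      · by_cases h85 : v = 5985
        · subst h85; right; right; left; exact ⟨by decide, rfl⟩
        · by_cases h89 : v = 3389
          · subst h89; right; right; right; left; exact ⟨by decide, rfl⟩
          · right; right; right; right
            constructor
            · simp [PySem.Dict.ofList, PySem.Dict.update, PySem.Dict.getD_insert,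
                    PySem.Dict.getD_empty, h22, h86, h85, h89]
            · intro q hq
              fin_cases hq <;> simp [h22, h86, h85, h89]

theorem pvFindA_cons_skip (ports : List Int) (s : List (String × Int))
    (rest : List (List (String × Int))) (h : ∀ q ∈ ports, pvGetPort? s ≠ some q) :
    pvFindA ports (s :: rest) = pvFindA ports rest := by
  induction ports with
  | nil => rfl
  | cons p ps ih =>
    simp only [pvFindA, pvScanA_cons_ne s rest p (h p (List.mem_cons_self))]
    rcases pvScanA rest p with _ | t
    · exact ih (fun q hq => h q (List.mem_cons_of_mem _ hq))
    · rfl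

theorem pvFindA_hit (ports₁ ports₂ : List Int) (pk : Int) (s : List (String × Int))
    (rest : List (List (String × Int)))
    (hskip : ∀ q ∈ ports₁, pvGetPort? s ≠ some q) (hhit : pvGetPort? s = some pk) :
    pvFindA (ports₁ ++ pk :: ports₂) (s :: rest) =
      match pvFindA ports₁ rest with | some t => some t | none => some s := by
  induction ports₁ with
  | nil => simp only [List.nil_append, pvFindA, pvScanA_cons_eq s rest pk hhit]
  | cons p ps ih =>
    simp only [List.cons_append, pvFindA, pvScanA_cons_ne s rest p (hskip p (List.mem_cons_self))]
    rcases pvScanA rest p with _ | t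
    · exact ih (fun q hq => hskip q (List.mem_cons_of_mem _ hq))
    · rfl

theorem pvLoopB_eq_find (services : List (List (String × Int))) :
    ∀ (best : Option (List (String × Int))) (br : Int),
      br = 1 ∨ br = 2 ∨ br = 3 ∨ br = 4 →
      pvLoopB services best br =
        match pvFindA (pvPortsBelow br) services with
        | some s => some s
        | none => best := by
  induction services with
  | nil => intro best br _; simp [pvLoopB, pvFindA_nil]
  | cons s rest ih =>
    intro best br hbr
    have hP1 : pvPortsBelow 1 = [22] := by norm_num [pvPortsBelow]
    have hP2 : pvPortsBelow 2 = [22, 5986] := by norm_num [pvPortsBelow]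
    have hP3 : pvPortsBelow 3 = [22, 5986, 5985] := by norm_num [pvPortsBelow]
    have hP4 : pvPortsBelow 4 = [22, 5986, 5985, 3389] := by norm_num [pvPortsBelow]
    rcases pvRank_cases s with ⟨hr, hp⟩ | ⟨hr, hp⟩ | ⟨hr, hp⟩ | ⟨hr, hp⟩ | ⟨hr, hp⟩ <;>
      rcases hbr with rfl | rfl | rfl | rfl <;>
      simp only [pvLoopB, hr, hP1, hP2, hP3, hP4] <;> norm_num
    -- rank 0 (port 22): early return; the first scan of A hits s
    · rw [show ([22] : List Int) = [] ++ 22 :: [] from rfl, pvFindA_hit _ _ _ _ _ (by simp) hp]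
      rfl
    · rw [show ([22, 5986] : List Int) = [] ++ 22 :: [5986] from rfl,
          pvFindA_hit _ _ _ _ _ (by simp) hp]
      rfl
    · rw [show ([22, 5986, 5985] : List Int) = [] ++ 22 :: [5986, 5985] from rfl,
          pvFindA_hit _ _ _ _ _ (by simp) hp]
      rfl
    · rw [show ([22, 5986, 5985, 3389] : List Int) = [] ++ 22 :: [5986, 5985, 3389] from rfl,
          pvFindA_hit _ _ _ _ _ (by simp) hp]
      rfl
    -- rank 1 (port 5986)
    · rw [ih best 1 (by norm_num), hP1,
          pvFindA_cons_skip _ _ _ (by intro q hq; fin_cases hq <;> simp [hp])]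
    · rw [ih (some s) 1 (by norm_num), hP1,
          show ([22, 5986] : List Int) = [22] ++ 5986 :: [] from rfl,
          pvFindA_hit _ _ _ _ _ (by intro q hq; fin_cases hq <;> simp [hp]) hp]
      rcases pvFindA [22] rest with _ | t <;> rfl
    · rw [ih (some s) 1 (by norm_num), hP1,
          show ([22, 5986, 5985] : List Int) = [22] ++ 5986 :: [5985] from rfl,
          pvFindA_hit _ _ _ _ _ (by intro q hq; fin_cases hq <;> simp [hp]) hp]
      rcases pvFindA [22] rest with _ | t <;> rfl
    · rw [ih (some s) 1 (by norm_num), hP1,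
          show ([22, 5986, 5985, 3389] : List Int) = [22] ++ 5986 :: [5985, 3389] from rfl,
          pvFindA_hit _ _ _ _ _ (by intro q hq; fin_cases hq <;> simp [hp]) hp]
      rcases pvFindA [22] rest with _ | t <;> rfl
    -- rank 2 (port 5985)
    · rw [ih best 1 (by norm_num), hP1,
          pvFindA_cons_skip _ _ _ (by intro q hq; fin_cases hq <;> simp [hp])]
    · rw [ih best 2 (by norm_num), hP2,
          pvFindA_cons_skip _ _ _ (by intro q hq; fin_cases hq <;> simp [hp])]
    · rw [ih (some s) 2 (by norm_num), hP2,
          show ([22, 5986, 5985] : List Int) = [22, 5986] ++ 5985 :: [] from rfl,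
          pvFindA_hit _ _ _ _ _ (by intro q hq; fin_cases hq <;> simp [hp]) hp]
      rcases pvFindA [22, 5986] rest with _ | t <;> rfl
    · rw [ih (some s) 2 (by norm_num), hP2,
          show ([22, 5986, 5985, 3389] : List Int) = [22, 5986] ++ 5985 :: [3389] from rfl,
          pvFindA_hit _ _ _ _ _ (by intro q hq; fin_cases hq <;> simp [hp]) hp]
      rcases pvFindA [22, 5986] rest with _ | t <;> rfl
    -- rank 3 (port 3389)
    · rw [ih best 1 (by norm_num), hP1,
          pvFindA_cons_skip _ _ _ (by intro q hq; fin_cases hq <;> simp [hp])]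
    · rw [ih best 2 (by norm_num), hP2,
          pvFindA_cons_skip _ _ _ (by intro q hq; fin_cases hq <;> simp [hp])]
    · rw [ih best 3 (by norm_num), hP3,
          pvFindA_cons_skip _ _ _ (by intro q hq; fin_cases hq <;> simp [hp])]
    · rw [ih (some s) 3 (by norm_num), hP3,
          show ([22, 5986, 5985, 3389] : List Int) = [22, 5986, 5985] ++ 3389 :: [] from rfl,
          pvFindA_hit _ _ _ _ _ (by intro q hq; fin_cases hq <;> simp [hp]) hp]
      rcases pvFindA [22, 5986, 5985] rest with _ | t <;> rfl
    -- rank 4 (no priority port)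
    · rw [ih best 1 (by norm_num), hP1,
          pvFindA_cons_skip _ _ _ (by intro q hq; exact hp q (by fin_cases hq <;> decide))]
    · rw [ih best 2 (by norm_num), hP2,
          pvFindA_cons_skip _ _ _ (by intro q hq; exact hp q (by fin_cases hq <;> decide))]
    · rw [ih best 3 (by norm_num), hP3,
          pvFindA_cons_skip _ _ _ (by intro q hq; exact hp q (by fin_cases hq <;> decide))]
    · rw [ih best 4 (by norm_num), hP4,
          pvFindA_cons_skip _ _ _ (by intro q hq; exact hp q (by fin_cases hq <;> decide))]

theorem pvOuterA_eq_findA (ports : List Int) (services : List (List (String × Int))) :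
    pvOuterA ports services =
      match pvFindA ports services with
      | some s => some s
      | none => services.head? := by
  induction ports with
  | nil => rfl
  | cons p ps ih =>
    simp only [pvOuterA, pvFindA]
    rcases pvScanA services p with _ | s
    · exact ih
    · rfl

theorem select_preferred_service_spec : Claim_equal_select_preferred_service := by
  intro services _ _
  unfold Spec_select_preferred_service
  unfold select_preferred_service select_preferred_service_alt
  by_cases h : services = []
  · simp [h]
  · simp only [if_neg h]
    rw [pvLoopB_eq_find services none 4 (by norm_num)]
    have hp : pvPortsBelow 4 = [22, 5986, 5985, 3389] := by norm_num [pvPortsBelow]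
    rw [hp, pvOuterA_eq_findA]
    rcases pvFindA [22, 5986, 5985, 3389] services with _ | s <;> rfl
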